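-- pv_equiv track=rewrite | github.com/jackdewinter/pymarkdown | pymarkdown/inline_processor.py | __xdf
-- ===== SOURCE A (Python) =====
-- from typing import Any, Callable, Dict, List, Optional, Tuple, cast
--
-- def __xdf(tabified_text: str, newlines_encountered: int) -> Tuple[str, int]:
--
--     # POGGER.debug("newlines_encountered=>:$:<", newlines_encountered)
--     # POGGER.debug("tabified_text>:$:<", tabified_text)
--     start_index = 0
--     for _ in range(newlines_encountered):
--         next_index = tabified_text.find("\n", start_index)
--         assert next_index != -1
--         start_index = next_index + 1
--     # POGGER.debug("start_index>:$:<", start_index)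
--     # POGGER.debug("tabified_text[start_index:]>:$:<", tabified_text[start_index:])
--
--     next_index = tabified_text.find("\n", start_index)
--     # POGGER.debug("next_index>:$:<", next_index)
--     assert next_index == -1
--     # if next_index != -1:
--     #     start_index = next_index + 1
--
--     return tabified_text[start_index:], start_index
-- ===== SOURCE B (Python) =====
-- def __xdf(tabified_text: str, newlines_encountered: int):
--     parts = tabified_text.split("\n")[newlines_encountered:]
--     suffix = parts[-1]
--     return suffix, len(tabified_text) - len(suffix)
-- ===== Notes on version B (the rewrite author's own statement) =====
-- stated objective: simpler
-- what changed: Replaces A's newlines_encountered-step find('\n') loop (plus two asserts) with a single split('\n'): B takes the segments from the newlines_encountered-th onward and returns the last one with its start index computed from lengths (raising IndexError, where A's loop assert raises AssertionError, when too few newlines exist).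
import Mathlib
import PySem

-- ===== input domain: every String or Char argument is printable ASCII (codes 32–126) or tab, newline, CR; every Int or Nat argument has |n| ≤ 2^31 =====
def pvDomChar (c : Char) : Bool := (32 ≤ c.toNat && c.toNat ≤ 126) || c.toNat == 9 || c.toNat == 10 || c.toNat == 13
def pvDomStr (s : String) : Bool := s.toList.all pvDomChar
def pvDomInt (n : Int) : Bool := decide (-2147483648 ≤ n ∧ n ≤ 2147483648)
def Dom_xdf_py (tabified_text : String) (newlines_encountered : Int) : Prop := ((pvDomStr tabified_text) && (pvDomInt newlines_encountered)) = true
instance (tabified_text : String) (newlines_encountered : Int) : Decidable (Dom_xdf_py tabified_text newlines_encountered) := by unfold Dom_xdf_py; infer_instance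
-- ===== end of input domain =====

-- B replaces A's n-step find("\n") loop and its two asserts with a single split("\n"): the segments from the
-- newlines_encountered-th onward are taken and the result is the last one with its start index; objective: simpler.

-- ===== PORT A =====
-- the `for _ in range(newlines_encountered)` loop; `none` = the in-loop `assert next_index != -1` failed
def xdfLoopA (t : String) : Nat → Int → Option Int
  | 0, start => some start
  | fuel+1, start =>
      let next := PySem.Str.findFrom t "\n" start
      if next = -1 then none
      else xdfLoopA t fuel (next + 1)

def xdf_py (tabified_text : String) (newlines_encountered : Int) : String × Int :=
  match xdfLoopA tabified_text newlines_encountered.toNat 0 with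
  | none => ("", -1)       -- AssertionError in the loop (outside Pre_)
  | some start =>
    let next := PySem.Str.findFrom tabified_text "\n" start
    if next = -1 then (PySem.Str.slice tabified_text (some start) none, start)
    else ("", -1)          -- final `assert next_index == -1` failed (outside Pre_)

-- ===== PORT B =====
def xdf_py_alt (tabified_text : String) (newlines_encountered : Int) : String × Int :=
  let parts := PySem.List.slice ((PySem.Str.split? tabified_text "\n").getD []) (some newlines_encountered) none
  match PySem.List.pyGet? parts (-1) with
  | none => ("", -1)   -- parts[-1] raises IndexError (outside Pre_)
  | some suffix => (suffix, PySem.Str.len tabified_text - PySem.Str.len suffix)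

-- ===== PRECONDITION & SPEC =====
-- Pre_ = exactly the inputs on which Python A returns (no AssertionError): the number of "\n" in the text
-- equals newlines_encountered, or newlines_encountered is negative (empty range) and the text has no "\n".
def Pre_xdf_py (tabified_text : String) (newlines_encountered : Int) : Prop :=
  (PySem.Str.count tabified_text "\n" : Int) = newlines_encountered ∨
    (newlines_encountered < 0 ∧ PySem.Str.count tabified_text "\n" = 0)
instance (tabified_text : String) (newlines_encountered : Int) : Decidable (Pre_xdf_py tabified_text newlines_encountered) := by unfold Pre_xdf_py; infer_instance

def pvWitness_xdf_py : String × Int := ("a\nb", 1)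

def Spec_xdf_py (tabified_text : String) (newlines_encountered : Int) (out : String × Int) : Prop := out = xdf_py_alt tabified_text newlines_encountered
instance (tabified_text : String) (newlines_encountered : Int) (out : String × Int) : Decidable (Spec_xdf_py tabified_text newlines_encountered out) := by unfold Spec_xdf_py; infer_instance

-- ===== CLAIM (what is proved, stated in full; the proofs are below) =====
def Claim_equal_xdf_py : Prop := ∀ (tabified_text : String) (newlines_encountered : Int), Dom_xdf_py tabified_text newlines_encountered → Pre_xdf_py tabified_text newlines_encountered → Spec_xdf_py tabified_text newlines_encountered (xdf_py tabified_text newlines_encountered)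

-- ===== LEMMAS AND PROOFS =====

def afterLast : List Char → List Char
  | [] => []
  | c :: rest => if c = '\n' ∨ '\n' ∈ rest then afterLast rest else c :: rest

def splitRef : List Char → List (List Char)
  | [] => [[]]
  | c :: rest =>
      if c = '\n' then [] :: splitRef rest
      else match splitRef rest with
        | [] => [[c]]
        | seg :: segs => (c :: seg) :: segs

theorem splitRef_ne_nil (s : List Char) : splitRef s ≠ [] := by
  cases s with
  | nil => simp [splitRef]
  | cons c rest =>
    simp only [splitRef]
    split_ifs
    · simp
    · cases h : splitRef rest <;> simp

theorem length_splitRef (s : List Char) : (splitRef s).length = s.count '\n' + 1 := by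
  induction s with
  | nil => simp [splitRef]
  | cons c rest ih =>
    simp only [splitRef]
    split_ifs with hc
    · subst hc; simp [ih]
    · cases h : splitRef rest with
      | nil => exact absurd h (splitRef_ne_nil rest)
      | cons seg segs => simp [hc, ← ih, h]

theorem afterLast_no_nl (s : List Char) : '\n' ∉ afterLast s := by
  induction s with
  | nil => simp [afterLast]
  | cons c rest ih =>
    simp only [afterLast]
    split_ifs with h
    · exact ih
    · intro hmem
      rcases List.mem_cons.mp hmem with h1 | h2
      · exact h (Or.inl h1.symm)
      · exact h (Or.inr h2)

theorem afterLast_eq_self (s : List Char) (h : '\n' ∉ s) : afterLast s = s := by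
  cases s with
  | nil => rfl
  | cons c rest =>
    simp only [afterLast]
    rw [if_neg]
    simp only [List.mem_cons, not_or] at h
    exact fun hor => hor.elim (fun hc => h.1 hc.symm) h.2

theorem splitRef_no_nl (s : List Char) (h : '\n' ∉ s) : splitRef s = [s] := by
  induction s with
  | nil => rfl
  | cons c rest ih =>
    simp only [List.mem_cons, not_or] at h
    simp only [splitRef]
    rw [if_neg (fun hc => h.1 hc.symm), ih h.2]

theorem getLast?_splitRef (s : List Char) : (splitRef s).getLast? = some (afterLast s) := by
  induction s with
  | nil => rfl
  | cons c rest ih =>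
    by_cases hc : c = '\n'
    · subst hc
      simp only [splitRef, if_pos]
      have hA : afterLast ('\n' :: rest) = afterLast rest := by
        simp [afterLast]
      rw [hA]
      cases h : splitRef rest with
      | nil => exact absurd h (splitRef_ne_nil rest)
      | cons seg segs => rw [List.getLast?_cons_cons, ← h, ih]
    · by_cases hm : '\n' ∈ rest
      · have h2 : (splitRef rest).length = rest.count '\n' + 1 := length_splitRef rest
        have hpos : 0 < rest.count '\n' := List.count_pos_iff.mpr hm
        have hA : afterLast (c :: rest) = afterLast rest := by
          simp only [afterLast]; rw [if_pos (Or.inr hm)]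
        cases h : splitRef rest with
        | nil => exact absurd h (splitRef_ne_nil rest)
        | cons seg segs =>
          cases segs with
          | nil => rw [h] at h2; simp at h2; omega
          | cons s1 ss =>
            simp only [splitRef, if_neg hc, h]
            rw [List.getLast?_cons_cons, hA]
            rw [h, List.getLast?_cons_cons] at ih
            exact ih
      · have hnotin : '\n' ∉ c :: rest := by
          simp only [List.mem_cons, not_or]
          exact ⟨fun h1 => hc h1.symm, hm⟩
        rw [splitRef_no_nl _ hnotin, afterLast_eq_self _ hnotin]
        rfl

theorem countgo_nl (l : List Char) : ∀ (fuel acc : Nat), l.length ≤ fuel →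
    PySem.Chars.count.go ['\n'] fuel l acc = acc + l.count '\n' := by
  induction l with
  | nil =>
    intro fuel acc h
    cases fuel <;> simp [PySem.Chars.count.go]
  | cons c rest ih =>
    intro fuel acc h
    cases fuel with
    | zero => simp at h
    | succ f =>
      simp only [PySem.Chars.count.go]
      by_cases hc : c = '\n'
      · subst hc
        rw [if_pos (by simp [List.isPrefixOf])]
        simp only [List.length_cons, List.length_nil, Nat.zero_add, List.drop_succ_cons, List.drop_zero]
        rw [ih f (acc+1) (by simpa using h)]
        simp
        omega
      · rw [if_neg (by simp [List.isPrefixOf]; exact fun h1 => hc h1.symm)]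
        rw [ih f acc (by simpa using h)]
        simp [hc]

theorem count_nl (s : List Char) : PySem.Chars.count s ['\n'] = s.count '\n' := by
  simp only [PySem.Chars.count]
  rw [if_neg (by simp)]
  simpa using countgo_nl s s.length 0 le_rfl

def consHead (p : List Char) : List (List Char) → List (List Char)
  | [] => [p]
  | seg :: segs => (p ++ seg) :: segs

theorem splitOngo_nl (l : List Char) : ∀ (fuel : Nat) (cur : List Char) (acc : List (List Char)),
    l.length ≤ fuel →
    PySem.Chars.splitOn.go ['\n'] fuel l cur acc = acc.reverse ++ consHead cur.reverse (splitRef l) := by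
  induction l with
  | nil =>
    intro fuel cur acc h
    cases fuel <;> simp [PySem.Chars.splitOn.go, splitRef, consHead]
  | cons c rest ih =>
    intro fuel cur acc h
    cases fuel with
    | zero => simp at h
    | succ f =>
      simp only [PySem.Chars.splitOn.go]
      by_cases hc : c = '\n'
      · subst hc
        rw [if_pos (by simp [List.isPrefixOf])]
        simp only [List.length_cons, List.length_nil, Nat.zero_add, List.drop_succ_cons, List.drop_zero]
        rw [ih f [] (cur.reverse :: acc) (by simpa using h)]
        simp only [splitRef, if_pos, List.reverse_cons, List.reverse_nil]
        cases hs : splitRef rest with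
        | nil => exact absurd hs (splitRef_ne_nil rest)
        | cons seg segs => simp [consHead]
      · rw [if_neg (by simp [List.isPrefixOf]; exact fun h1 => hc h1.symm)]
        rw [ih f (c :: cur) acc (by simpa using h)]
        simp only [splitRef, if_neg hc, List.reverse_cons]
        cases hs : splitRef rest with
        | nil => exact absurd hs (splitRef_ne_nil rest)
        | cons seg segs => simp [consHead]

theorem splitOn_nl (s : List Char) : PySem.Chars.splitOn s ['\n'] = splitRef s := by
  simp only [PySem.Chars.splitOn]
  rw [splitOngo_nl s (s.length + 1) [] [] (by omega)]
  cases hs : splitRef s with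
  | nil => exact absurd hs (splitRef_ne_nil s)
  | cons seg segs => simp [consHead]

theorem pyGet?_neg_one {α : Type} (xs : List α) (h : xs ≠ []) :
    PySem.List.pyGet? xs (-1) = xs.getLast? := by
  have hl : 0 < xs.length := List.length_pos_iff.mpr h
  simp only [PySem.List.pyGet?, PySem.List.pyIdx?]
  rw [if_neg (by omega), if_pos (by omega)]
  simp [List.getLast?_eq_getElem?]

theorem singleton_prefix_iff {α : Type} (x : α) (l : List α) :
    [x] <+: l ↔ l.head? = some x := by
  cases l with
  | nil => simp
  | cons a t => simp [List.cons_prefix_cons, eq_comm]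

theorem afterLast_append (a b : List Char) : afterLast (a ++ '\n' :: b) = afterLast b := by
  induction a with
  | nil => simp [afterLast]
  | cons x a' ih =>
    simp only [List.cons_append, afterLast]
    rw [if_pos (Or.inr (by simp))]
    exact ih

theorem loopA_spec (t : String) : ∀ (fuel k : Nat), k ≤ t.toList.length →
    (t.toList.drop k).count '\n' = fuel →
    ∃ jn : Nat, jn ≤ t.toList.length ∧ t.toList.drop jn = afterLast (t.toList.drop k) ∧
      xdfLoopA t fuel (k : Int) = some (jn : Int) := by
  intro fuel
  induction fuel with
  | zero =>
    intro k hk hc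
    refine ⟨k, hk, ?_, rfl⟩
    rw [afterLast_eq_self _ (List.count_eq_zero.mp hc)]
  | succ f ih =>
    intro k hk hc
    have hmem : '\n' ∈ t.toList.drop k := List.count_pos_iff.mp (by omega)
    have hinf : ['\n'] <:+: t.toList.drop k := (List.singleton_infix_iff _ _).mpr hmem
    have hjne : PySem.Chars.find (t.toList.drop k) ['\n'] ≠ -1 :=
      (PySem.Chars.find_ne_neg_one_iff _ _).mpr hinf
    have hj0 : 0 ≤ PySem.Chars.find (t.toList.drop k) ['\n'] :=
      (PySem.Chars.find_nonneg_iff _ _).mpr hinf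
    obtain ⟨hpre, hmin⟩ := PySem.Chars.find_spec hj0
    set s := t.toList.drop k with hs
    set j := PySem.Chars.find s ['\n'] with hjdef
    have hhead : (s.drop j.toNat).head? = some '\n' := (singleton_prefix_iff _ _).mp hpre
    have hget : s[j.toNat]? = some '\n' := by rw [← List.head?_drop]; exact hhead
    have hjlt : j.toNat < s.length := by
      rcases List.getElem?_eq_some_iff.mp hget with ⟨hlt, _⟩
      exact hlt
    have hdropj : s.drop j.toNat = '\n' :: s.drop (j.toNat + 1) := by
      rw [List.drop_eq_getElem_cons hjlt]
      congr 1
      exact (List.getElem?_eq_some_iff.mp hget).2 ▸ rfl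
    have hsplit : s = s.take j.toNat ++ '\n' :: s.drop (j.toNat + 1) := by
      conv_lhs => rw [← List.take_append_drop j.toNat s]
      rw [hdropj]
    have htake : '\n' ∉ s.take j.toNat := by
      intro hmem'
      rcases List.mem_iff_getElem.mp hmem' with ⟨i, hi, hEq⟩
      have hi' : i < j.toNat := lt_of_lt_of_le hi (by simp [List.length_take])
      have hgi : s[i]? = some '\n' := by
        have : (s.take j.toNat)[i]? = some '\n' := by
          rw [List.getElem?_eq_getElem hi]; simp [hEq]
        rwa [List.getElem?_take_of_lt hi'] at this
      apply hmin i hi'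
      rw [singleton_prefix_iff, List.head?_drop]
      exact hgi
    have hcount' : (s.drop (j.toNat + 1)).count '\n' = f := by
      have := hc
      rw [hsplit] at this
      rw [List.count_append, List.count_cons] at this
      rw [List.count_eq_zero.mpr htake] at this
      simp at this
      omega
    have hk' : j.toNat + 1 + k ≤ t.toList.length := by
      have : s.length = t.toList.length - k := by rw [hs, List.length_drop]
      omega
    have hdd : t.toList.drop (j.toNat + 1 + k) = s.drop (j.toNat + 1) := by
      rw [hs, List.drop_drop]
      congr 1
      omega
    obtain ⟨jn, hle, hdropeq, hloop⟩ := ih (j.toNat + 1 + k) hk' (by rw [hdd]; exact hcount')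
    refine ⟨jn, hle, ?_, ?_⟩
    · rw [hdropeq, hdd]
      conv_rhs => rw [hsplit]
      rw [afterLast_append]
    · show xdfLoopA t (f + 1) (k : Int) = some (jn : Int)
      have hnl : ("\n" : String).toList = ['\n'] := rfl
      have hfindfrom : PySem.Str.findFrom t "\n" (k : Int) = (k : Int) + j := by
        rw [PySem.Str.findFrom_eq, hnl, PySem.Chars.findFrom_natCast t.toList ['\n'] k hk]
        rw [← hs, ← hjdef, if_neg hjne]
      simp only [xdfLoopA, hfindfrom]
      rw [if_neg (by omega)]
      have harg : (k : Int) + j + 1 = ((j.toNat + 1 + k : Nat) : Int) := by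
        push_cast [Int.toNat_of_nonneg hj0]; ring
      rw [harg]
      exact hloop

theorem drop_length_sub_one {α : Type} (l : List α) (x : α) (h : l.getLast? = some x) :
    l.drop (l.length - 1) = [x] := by
  have hne : l ≠ [] := by intro h0; rw [h0] at h; simp at h
  have hpos : 0 < l.length := List.length_pos_iff.mpr hne
  have hlt : l.length - 1 < l.length := by omega
  rw [List.drop_eq_getElem_cons hlt]
  have hx : l[l.length - 1] = x := by
    rw [List.getLast?_eq_getElem?] at h
    have := List.getElem?_eq_getElem hlt
    rw [this] at h
    exact Option.some_injective _ h.symm ▸ (Option.some.injEq _ _ ▸ by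
      simp_all)
  rw [hx]
  have : l.length - 1 + 1 = l.length := by omega
  rw [this, List.drop_length]

theorem xdf_main (t : String) (n : Int) (hpre : Pre_xdf_py t n) :
    xdf_py t n = xdf_py_alt t n := by
  have hnl : ("\n" : String).toList = ['\n'] := rfl
  unfold Pre_xdf_py at hpre
  set m := t.toList.count '\n' with hm
  have hcnt : PySem.Str.count t "\n" = m := by
    rw [PySem.Str.count_eq, hnl, count_nl]
  have htn : n.toNat = m := by
    rcases hpre with h | ⟨hneg, h0⟩
    · rw [hcnt] at h; omega
    · rw [hcnt] at h0; omega
  obtain ⟨jn, hle, hdrop, hloop⟩ := loopA_spec t m 0 (Nat.zero_le _) (by simp [hm])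
  have hAfter : t.toList.drop jn = afterLast t.toList := by simpa using hdrop
  have hloop0 : xdfLoopA t m 0 = some (jn : Int) := by simpa using hloop
  have hnext : PySem.Str.findFrom t "\n" (jn : Int) = -1 := by
    rw [PySem.Str.findFrom_eq, hnl]
    rw [PySem.Chars.findFrom_natCast_eq_neg_one_iff t.toList ['\n'] jn hle]
    rw [hAfter, List.singleton_infix_iff]
    exact afterLast_no_nl t.toList
  have hA : xdf_py t n = (PySem.Str.slice t (some (jn : Int)) none, (jn : Int)) := by
    unfold xdf_py
    rw [htn, hloop0]
    simp only [hnext, if_pos]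
  have hsplit? : PySem.Str.split? t "\n" = some ((splitRef t.toList).map (fun l => String.ofList l)) := by
    simp only [PySem.Str.split?, PySem.Chars.split?, hnl]
    rw [if_neg (by simp)]
    rw [splitOn_nl]
    rfl
  have hsegla : ((splitRef t.toList).map (fun l => String.ofList l)).getLast?
      = some (String.ofList (afterLast t.toList)) := by
    rw [List.getLast?_map, getLast?_splitRef]
    rfl
  have hseglen : ((splitRef t.toList).map (fun l => String.ofList l)).length = m + 1 := by
    simp [length_splitRef, ← hm]
  have hparts : PySem.List.slice ((splitRef t.toList).map (fun l => String.ofList l)) (some n) none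
      = [String.ofList (afterLast t.toList)] := by
    rcases hpre with h | ⟨hneg, h0⟩
    · have hn : n = (m : Int) := by rw [← h, hcnt]
      rw [hn, PySem.List.slice_from _ (by positivity)]
      have : ((m : Int)).toNat = m := by omega
      rw [this]
      have hm1 : m = ((splitRef t.toList).map (fun l => String.ofList l)).length - 1 := by omega
      rw [hm1]
      exact drop_length_sub_one _ _ hsegla
    · have hm0 : m = 0 := by rw [hcnt] at h0; omega
      have hnomem : '\n' ∉ t.toList := List.count_eq_zero.mp (by rw [← hm]; exact hm0)
      have hsegs : (splitRef t.toList).map (fun l => String.ofList l) = [String.ofList t.toList] := by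
        rw [splitRef_no_nl _ hnomem]; rfl
      rw [hsegs, PySem.List.slice_some_none]
      set k := (-n).toNat with hkdef
      have hk : 0 < k := by omega
      have hn' : n = -(k : Int) := by omega
      rw [hn', PySem.List.clampIdx_neg_natCast _ _ hk]
      have : (1 : Nat) - k = 0 := by omega
      simp only [List.length_cons, List.length_nil, this, List.drop_zero]
      rw [afterLast_eq_self _ hnomem]
  have hB : xdf_py_alt t n = (String.ofList (afterLast t.toList),
      PySem.Str.len t - PySem.Str.len (String.ofList (afterLast t.toList))) := by
    unfold xdf_py_alt
    rw [hsplit?]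
    simp only [Option.getD_some]
    rw [hparts, pyGet?_neg_one _ (by simp)]
    simp
  rw [hA, hB]
  have hlens : (afterLast t.toList).length = t.toList.length - jn := by
    rw [← hAfter, List.length_drop]
  simp only [Prod.mk.injEq]
  constructor
  · simp only [PySem.Str.slice]
    congr 1
    rw [PySem.Chars.slice_eq_listSlice, PySem.List.slice_from_natCast, hAfter]
  · simp only [PySem.Str.len, String.toList_ofList]
    omega

-- ===== VERDICT (by name: the statement is the Claim_ definition above) =====
theorem xdf_py_spec : Claim_equal_xdf_py := by
  intro t n _ hpre
  unfold Spec_xdf_py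
  exact xdf_main t n hpre
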